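-- pv_equiv track=rewrite | github.com/taylorai/lm-deluge | src/lm_deluge/tool/prefab/filesystem.py | _parse_create_diff
-- ===== SOURCE A (Python) =====
-- from collections.abc import Callable, Iterable, Sequence
-- from dataclasses import dataclass
--
-- @dataclass
-- class ParserState:
--     lines: list[str]
--     index: int = 0
--     fuzz: int = 0
--
-- END_PATCH = "*** End Patch"
--
-- SECTION_TERMINATORS = [
--     END_PATCH,
--     "*** Update File:",
--     "*** Delete File:",
--     "*** Add File:",
-- ]
--
-- def _is_done(state: ParserState, prefixes: Sequence[str]) -> bool:
--     if state.index >= len(state.lines):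
--         return True
--     if any(state.lines[state.index].startswith(prefix) for prefix in prefixes):
--         return True
--     return False
--
-- def _parse_create_diff(lines: list[str]) -> str:
--     parser = ParserState(lines=[*lines, END_PATCH])
--     output: list[str] = []
--
--     while not _is_done(parser, SECTION_TERMINATORS):
--         if parser.index >= len(parser.lines):
--             break
--         line = parser.lines[parser.index]
--         parser.index += 1
--         if not line.startswith("+"):
--             raise ValueError(f"Invalid Add File Line: {line}")
--         output.append(line[1:])
--
--     return "\n".join(output)
-- ===== SOURCE B (Python) =====
-- END_PATCH = "*** End Patch"
--
-- SECTION_TERMINATORS = [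
--     END_PATCH,
--     "*** Update File:",
--     "*** Delete File:",
--     "*** Add File:",
-- ]
--
-- def _parse_create_diff(lines: list[str]) -> str:
--     # boundary = first line whose prefix is a section terminator (end of list if none)
--     boundary = next(
--         (i for i, line in enumerate(lines)
--          if any(line.startswith(p) for p in SECTION_TERMINATORS)),
--         len(lines),
--     )
--     body = lines[:boundary]
--     for line in body:
--         if not line.startswith("+"):
--             raise ValueError(f"Invalid Add File Line: {line}")
--     return "\n".join(line[1:] for line in body)
-- ===== Notes on version B (the rewrite author's own statement) =====
-- stated objective: simpler
-- what changed: Replaces A's ParserState/_is_done while-loop over lines+[END_PATCH] sentinel with a boundary index computed by next() over enumerate, a slice for the body, a separate validation pass, and a generator-expression join.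
import Mathlib
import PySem

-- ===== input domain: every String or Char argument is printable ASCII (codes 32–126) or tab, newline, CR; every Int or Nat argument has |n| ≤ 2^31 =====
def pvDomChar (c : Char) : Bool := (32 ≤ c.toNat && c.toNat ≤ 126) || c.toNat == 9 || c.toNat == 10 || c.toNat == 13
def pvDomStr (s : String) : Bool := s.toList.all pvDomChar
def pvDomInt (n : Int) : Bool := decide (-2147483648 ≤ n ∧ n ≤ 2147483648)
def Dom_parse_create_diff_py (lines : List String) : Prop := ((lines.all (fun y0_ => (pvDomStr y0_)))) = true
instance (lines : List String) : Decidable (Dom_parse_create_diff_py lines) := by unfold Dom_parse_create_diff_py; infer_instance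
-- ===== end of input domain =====

-- B replaces A's sentinel-terminated ParserState loop by computing the terminator boundary first,
-- then validating and joining the body in separate passes (objective: simpler decomposition, same cost).
-- Both raise ValueError on a non-'+' line before the boundary; those inputs are excluded by Pre_.

-- ===== PORT A =====
def pvEND_PATCH : String := "*** End Patch"

def pvSECTION_TERMINATORS : List String :=
  [pvEND_PATCH, "*** Update File:", "*** Delete File:", "*** Add File:"]

-- _is_done's prefix test on the current line (the index-past-end case is the [] case of pvLoopA)
def pvIsDone (l : String) : Bool :=
  pvSECTION_TERMINATORS.any (fun p => PySem.Str.startswith l p)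

-- the while loop of _parse_create_diff: state = (remaining parser.lines from parser.index, output)
def pvLoopA : List String → List String → List String
  | [], output => output
  | l :: rest, output =>
    if pvIsDone l then output
    else if !(PySem.Str.startswith l "+") then output  -- Python: raise ValueError (outside Pre_)
    else pvLoopA rest (output ++ [PySem.Str.slice l (some 1) none])

def parse_create_diff_py (lines : List String) : String :=
  PySem.Str.join "\n" (pvLoopA (lines ++ [pvEND_PATCH]) [])

-- ===== PORT B =====
-- any(line.startswith(p) for p in SECTION_TERMINATORS)
def pvIsTermB (l : String) : Bool :=
  pvSECTION_TERMINATORS.any (fun p => PySem.Str.startswith l p)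

-- next((i for i, line in enumerate(lines) if <terminator>), len(lines))
def pvBoundaryB : List String → Nat
  | [] => 0
  | l :: rest => if pvIsTermB l then 0 else pvBoundaryB rest + 1

def parse_create_diff_py_alt (lines : List String) : String :=
  let body := lines.take (pvBoundaryB lines)
  -- the validation pass: 'if not line.startswith("+"): raise ValueError' — raises outside Pre_,
  -- contributes nothing to the returned value inside Pre_
  PySem.Str.join "\n" (body.map (fun l => PySem.Str.slice l (some 1) none))

-- ===== PRECONDITION & SPEC =====
-- Pre_ excludes exactly the inputs where the Python raises ValueError (both A and B raise there,
-- with the same message): a line before the first section terminator that does not start with '+'.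
def Pre_parse_create_diff_py (lines : List String) : Prop :=
  ((lines.takeWhile (fun l => !pvIsDone l)).all (fun l => PySem.Str.startswith l "+")) = true
instance (lines : List String) : Decidable (Pre_parse_create_diff_py lines) := by
  unfold Pre_parse_create_diff_py; infer_instance

def pvWitness_parse_create_diff_py : List String := ["+a", "+b", "*** End Patch", "junk"]

def Spec_parse_create_diff_py (lines : List String) (out : String) : Prop :=
  out = parse_create_diff_py_alt lines
instance (lines : List String) (out : String) : Decidable (Spec_parse_create_diff_py lines out) := by
  unfold Spec_parse_create_diff_py; infer_instance

-- ===== CLAIM (what is proved, stated in full; the proofs are below) =====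
def Claim_equal_parse_create_diff_py : Prop :=
  ∀ (lines : List String), Dom_parse_create_diff_py lines →
    Pre_parse_create_diff_py lines →
    Spec_parse_create_diff_py lines (parse_create_diff_py lines)

-- ===== LEMMAS AND PROOFS =====

theorem pvIsDone_END_PATCH : pvIsDone pvEND_PATCH = true := by decide

theorem take_boundary_eq_takeWhile (lines : List String) :
    lines.take (pvBoundaryB lines) = lines.takeWhile (fun l => !pvIsDone l) := by
  induction lines with
  | nil => rfl
  | cons l rest ih =>
    by_cases h : pvIsTermB l = true
    · simp [pvBoundaryB, h, show pvIsDone l = true from h]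
    · have h' : pvIsDone l = false := by simpa [pvIsTermB, pvIsDone] using h
      simp [pvBoundaryB, h', show pvIsTermB l = false from h', ih]

theorem loopA_eq (lines : List String) (output : List String)
    (hpre : (lines.takeWhile (fun l => !pvIsDone l)).all
              (fun l => PySem.Str.startswith l "+") = true) :
    pvLoopA (lines ++ [pvEND_PATCH]) output =
      output ++ (lines.takeWhile (fun l => !pvIsDone l)).map
        (fun l => PySem.Str.slice l (some 1) none) := by
  induction lines generalizing output with
  | nil => simp [pvLoopA, pvIsDone_END_PATCH]
  | cons l rest ih =>
    by_cases h : pvIsDone l = true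
    · simp [pvLoopA, h]
    · have h' : pvIsDone l = false := by simpa using h
      have hplus : PySem.Chars.startswith l.toList ['+'] = true := by
        have := hpre; simp [h'] at this
        simpa using this.1
      have hrest : (rest.takeWhile (fun l => !pvIsDone l)).all
          (fun l => PySem.Str.startswith l "+") = true := by
        have := hpre; simp [h'] at this
        simpa [List.all_eq_true] using this.2
      simp [pvLoopA, h', hplus, ih _ hrest]

-- ===== VERDICT (by name: the statement is the Claim_ definition above) =====
theorem parse_create_diff_py_spec : Claim_equal_parse_create_diff_py := by
  intro lines _ hpre
  unfold Spec_parse_create_diff_py parse_create_diff_py parse_create_diff_py_alt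
  rw [take_boundary_eq_takeWhile, loopA_eq lines [] hpre]
  simp
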